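-- pv_equiv track=rewrite | github.com/akv17/NLP_IV | run.py | ctx_permutations
-- ===== SOURCE A (Python) =====
-- def ctx_permutations(ctx, ws, pad_with='#'):
--     le, ri = ws
--     ctxs = []
--     cache = set()
--
--     for i, x in enumerate(ctx):
--         if x == pad_with or x in cache:
--             continue
--
--         cache.add(x)
--         plchld = [[], [], []]
--         plchld[1].append(x)
--
--         for j, y in enumerate(ctx):
--             if i == j:
--                 continue
--
--             if len(plchld[0]) < le:
--                 plchld[0].append(y)
--
--             else:
--                 plchld[2].append(y)
--
--         ctxs.append(plchld)
--
--     return ctxs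
-- ===== SOURCE B (Python) =====
-- def _entry(ctx, i, x, k):
--     seq = ctx[:i] + ctx[i + 1:]
--     return [seq[:k], [x], seq[k:]]
--
--
-- def ctx_permutations(ctx, ws, pad_with='#'):
--     k = max(ws[0], 0)
--     first = {}
--     for i, x in enumerate(ctx):
--         if x != pad_with and x not in first:
--             first[x] = i
--     return [_entry(ctx, i, x, k) for x, i in first.items()]
-- ===== Notes on version B (the rewrite author's own statement) =====
-- stated objective: simpler
-- what changed: A's inner element-by-element counting loop over the whole context is replaced by removing index i with two slices and splitting left/right at max(le,0) by index arithmetic (bulk slice copies instead of a per-element interpreted loop), and the seen-set plus in-loop append is replaced by a first-occurrence index dict built once and mapped afterwards.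
import Mathlib
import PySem

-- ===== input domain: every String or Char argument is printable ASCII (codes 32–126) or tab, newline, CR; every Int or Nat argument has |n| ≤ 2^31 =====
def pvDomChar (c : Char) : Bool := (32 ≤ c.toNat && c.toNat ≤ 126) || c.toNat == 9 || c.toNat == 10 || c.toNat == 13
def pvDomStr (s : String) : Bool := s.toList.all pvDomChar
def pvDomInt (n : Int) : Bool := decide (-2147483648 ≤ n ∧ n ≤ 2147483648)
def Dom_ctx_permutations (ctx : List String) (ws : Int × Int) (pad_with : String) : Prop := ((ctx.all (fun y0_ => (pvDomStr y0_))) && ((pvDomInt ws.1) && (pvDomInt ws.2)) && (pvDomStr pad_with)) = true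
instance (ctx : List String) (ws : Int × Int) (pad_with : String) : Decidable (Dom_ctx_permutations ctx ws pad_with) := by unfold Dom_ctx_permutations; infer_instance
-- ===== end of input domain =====

-- B replaces A's element-by-element inner counting loop by index arithmetic (seq = ctx without i,
-- left/right = one slice each at max(le,0)) and collects first-occurrence indices in a dict built
-- once, mapped afterwards; objective: simpler.

-- ===== PORT A =====
def ctx_permutations (ctx : List String) (ws : Int × Int) (pad_with : String) : List (List (List String)) :=
  let le := ws.1
  ((PySem.List.enumerate ctx 0).foldl
    (fun (st : PySem.Set String × List (List (List String))) ix =>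
      if ix.2 == pad_with || PySem.Set.contains st.1 ix.2 then st
      else
        let cache := PySem.Set.add st.1 ix.2
        let plchld := (PySem.List.enumerate ctx 0).foldl
          (fun (p : List String × List String) jy =>
            if jy.1 == ix.1 then p
            else if (p.1.length : Int) < le then (p.1 ++ [jy.2], p.2)
            else (p.1, p.2 ++ [jy.2])) ([], [])
        (cache, st.2 ++ [[plchld.1, [ix.2], plchld.2]]))
    ((PySem.Set.empty : PySem.Set String), [])).2

-- ===== PORT B =====
-- helper _entry of Source B
def ctx_entry (ctx : List String) (i : Int) (x : String) (k : Int) : List (List String) :=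
  let seq := PySem.List.slice ctx none (some i) ++ PySem.List.slice ctx (some (i + 1)) none
  [PySem.List.slice seq none (some k), [x], PySem.List.slice seq (some k) none]

def ctx_permutations_alt (ctx : List String) (ws : Int × Int) (pad_with : String) : List (List (List String)) :=
  let k := max ws.1 0
  let first := (PySem.List.enumerate ctx 0).foldl
    (fun (d : PySem.Dict String Int) ix =>
      if ix.2 != pad_with && !(d.contains ix.2) then d.insert ix.2 ix.1 else d)
    PySem.Dict.empty
  first.items.map (fun p => ctx_entry ctx p.2 p.1 k)

-- ===== PRECONDITION & SPEC =====
def Spec_ctx_permutations (ctx : List String) (ws : Int × Int) (pad_with : String) (out : List (List (List String))) : Prop := out = ctx_permutations_alt ctx ws pad_with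
instance (ctx : List String) (ws : Int × Int) (pad_with : String) (out : List (List (List String))) : Decidable (Spec_ctx_permutations ctx ws pad_with out) := by unfold Spec_ctx_permutations; infer_instance

-- ===== CLAIM (what is proved, stated in full; the proofs are below) =====
def Claim_equal_ctx_permutations : Prop := ∀ (ctx : List String) (ws : Int × Int) (pad_with : String), Dom_ctx_permutations ctx ws pad_with → Spec_ctx_permutations ctx ws pad_with (ctx_permutations ctx ws pad_with)

-- ===== LEMMAS AND PROOFS =====

-- A's inner loop without the skip: it fills the left list up to ⌊le⌋₊ elements, then the right one.
theorem inner_plain (le : Int) (seq : List String) (l r : List String) :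
    seq.foldl (fun (p : List String × List String) y =>
        if (p.1.length : Int) < le then (p.1 ++ [y], p.2) else (p.1, p.2 ++ [y])) (l, r)
      = (l ++ seq.take (le.toNat - l.length), r ++ seq.drop (le.toNat - l.length)) := by
  induction seq generalizing l r with
  | nil => simp
  | cons y ys ih =>
    by_cases h : (l.length : Int) < le
    · have hk : le.toNat - l.length = (le.toNat - (l.length + 1)) + 1 := by omega
      simp only [List.foldl_cons, if_pos h, ih (l ++ [y]) r, hk]
      simp [List.take_succ_cons, List.append_assoc]
    · have hk : le.toNat - l.length = 0 := by omega
      simp only [List.foldl_cons, if_neg h, ih l (r ++ [y]), hk]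
      simp [List.append_assoc]

-- A's inner loop with the skip equals the plain loop over the non-skipped elements.
theorem inner_skip (le : Int) (i : Int) (pairs : List (Int × String)) (acc : List String × List String) :
    pairs.foldl (fun (p : List String × List String) jy =>
        if jy.1 == i then p
        else if (p.1.length : Int) < le then (p.1 ++ [jy.2], p.2) else (p.1, p.2 ++ [jy.2])) acc
      = ((pairs.filter (fun q => !(q.1 == i))).map (·.2)).foldl
          (fun (p : List String × List String) y =>
            if (p.1.length : Int) < le then (p.1 ++ [y], p.2) else (p.1, p.2 ++ [y])) acc := by
  induction pairs generalizing acc with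
  | nil => rfl
  | cons q qs ih =>
    by_cases h : (q.1 == i) = true
    · rw [List.foldl_cons, if_pos h, List.filter_cons]
      have hf : (!(q.1 == i)) = false := by simp [h]
      rw [hf, if_neg (by simp)]
      exact ih acc
    · rw [List.foldl_cons, if_neg h, List.filter_cons]
      have hf : (!(q.1 == i)) = true := by simp [h]
      rw [hf, if_pos rfl, List.map_cons, List.foldl_cons]
      exact ih _

-- Filtering index n out of the enumeration and keeping the values removes exactly element n.
theorem filter_enumerate (ctx : List String) (s : Int) (n : Nat) (hn : n < ctx.length) :
    ((PySem.List.enumerate ctx s).filter (fun q => !(q.1 == s + (n : Int)))).map (·.2)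
      = ctx.take n ++ ctx.drop (n + 1) := by
  induction ctx generalizing s n with
  | nil => simp at hn
  | cons x xs ih =>
    cases n with
    | zero =>
      rw [PySem.List.enumerate_cons]
      have h0 : ((s, x).1 == s + ((0 : Nat) : Int)) = true := by simp
      have hall : (PySem.List.enumerate xs (s + 1)).filter (fun q => !(q.1 == s + ((0 : Nat) : Int))) = PySem.List.enumerate xs (s + 1) := by
        apply List.filter_eq_self.mpr
        intro q hq
        rcases (PySem.List.mem_enumerate_iff _ _ _).mp hq with ⟨k, hk, rfl⟩
        simp only [Bool.not_eq_eq_eq_not, Bool.not_true, beq_eq_false_iff_ne, ne_eq]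
        omega
      simp only [List.filter_cons, h0, Bool.not_true, hall]
      simp [PySem.List.map_snd_enumerate]
    | succ m =>
      rw [PySem.List.enumerate_cons]
      have h0 : (!((s, x).1 == s + ((m + 1 : Nat) : Int))) = true := by
        simp only [Bool.not_eq_eq_eq_not, Bool.not_true, beq_eq_false_iff_ne, ne_eq]
        omega
      have heq : (fun (q : Int × String) => !(q.1 == s + ((m + 1 : Nat) : Int)))
               = (fun (q : Int × String) => !(q.1 == (s + 1) + ((m : Nat) : Int))) := by
        funext q
        have : s + ((m + 1 : Nat) : Int) = (s + 1) + ((m : Nat) : Int) := by push_cast; ring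
        rw [this]
      simp only [List.filter_cons, heq]
      have h1 : (!(s == s + 1 + (m : Int))) = true := by
        have : s ≠ s + 1 + (m : Int) := by omega
        simp [this]
      rw [h1, if_pos rfl, List.map_cons, ih (s + 1) m (by simpa using Nat.lt_of_succ_lt_succ hn)]
      simp

-- B's entry at a valid index, written via take/drop.
theorem entry_eq (ctx : List String) (le : Int) (x : String) (n : Nat) :
    ctx_entry ctx (n : Int) x (max le 0)
      = [(ctx.take n ++ ctx.drop (n + 1)).take le.toNat, [x],
         (ctx.take n ++ ctx.drop (n + 1)).drop le.toNat] := by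
  have h1 : PySem.List.slice ctx none (some (n : Int)) = ctx.take n := by
    rw [PySem.List.slice_to ctx (by omega)]; simp
  have h2 : PySem.List.slice ctx (some ((n : Int) + 1)) none = ctx.drop (n + 1) := by
    have ht : ((n : Int) + 1).toNat = n + 1 := by omega
    rw [PySem.List.slice_from ctx (by omega), ht]
  have hk : (max le 0).toNat = le.toNat := by omega
  have hk0 : (0 : Int) ≤ max le 0 := by omega
  simp only [ctx_entry]
  rw [h1, h2, PySem.List.slice_to _ hk0, PySem.List.slice_from _ hk0, hk]

-- The outer loops in lockstep: A's (cache, out) state versus B's first-occurrence dict.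
theorem outer_lockstep (ctx : List String) (le : Int) (pad_with : String)
    (l : List (Int × String)) (cache : PySem.Set String) (d : PySem.Dict String Int)
    (out : List (List (List String)))
    (hinv : ∀ x : String, PySem.Set.contains cache x = d.contains x)
    (hmem : ∀ q ∈ l, ∃ n : Nat, n < ctx.length ∧ q.1 = (n : Int)) :
    ∃ news : List (String × Int),
      (l.foldl (fun (d : PySem.Dict String Int) ix =>
          if ix.2 != pad_with && !(d.contains ix.2) then d.insert ix.2 ix.1 else d) d).items
        = d.items ++ news
      ∧ (l.foldl (fun (st : PySem.Set String × List (List (List String))) ix =>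
          if ix.2 == pad_with || PySem.Set.contains st.1 ix.2 then st
          else
            let cache := PySem.Set.add st.1 ix.2
            let plchld := (PySem.List.enumerate ctx 0).foldl
              (fun (p : List String × List String) jy =>
                if jy.1 == ix.1 then p
                else if (p.1.length : Int) < le then (p.1 ++ [jy.2], p.2)
                else (p.1, p.2 ++ [jy.2])) ([], [])
            (cache, st.2 ++ [[plchld.1, [ix.2], plchld.2]])) (cache, out)).2
        = out ++ news.map (fun p => ctx_entry ctx p.2 p.1 (max le 0)) := by
  induction l generalizing cache d out with
  | nil => exact ⟨[], by simp, by simp⟩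
  | cons q qs ih =>
    obtain ⟨n, hn, hq1⟩ := hmem q (by simp)
    by_cases hskip : (q.2 == pad_with || PySem.Set.contains cache q.2) = true
    · -- both sides skip q
      have hb : (q.2 != pad_with && !(d.contains q.2)) = false := by
        rcases Bool.or_eq_true_iff.mp hskip with h | h
        · have hp : (q.2 != pad_with) = false := by simp [bne, h]
          rw [hp, Bool.false_and]
        · rw [hinv] at h
          rw [h, Bool.not_true, Bool.and_false]
      obtain ⟨news, hB, hA⟩ := ih cache d out hinv (fun p hp => hmem p (by simp [hp]))
      refine ⟨news, ?_, ?_⟩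
      · have hd : (if (q.2 != pad_with && !(d.contains q.2)) = true then d.insert q.2 q.1 else d) = d := by
          rw [hb]; simp
        rw [List.foldl_cons, hd]
        exact hB
      · rw [List.foldl_cons, if_pos hskip]
        exact hA
    · -- both sides process q
      have hpad : (q.2 == pad_with) = false := by
        cases h : (q.2 == pad_with) <;> simp_all
      have hc : PySem.Set.contains cache q.2 = false := by
        cases h : PySem.Set.contains cache q.2 <;> simp_all
      have hdc : d.contains q.2 = false := by rw [← hinv]; exact hc
      have hb : (q.2 != pad_with && !(d.contains q.2)) = true := by simp [bne, hpad, hdc]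
      have contains_add : ∀ (st : PySem.Set String) (a y : String),
          (PySem.Set.add st a).contains y = (y == a || st.contains y) := by
        intro st a y
        cases hx : (y == a) with
        | false =>
          have hne : y ≠ a := by simpa using hx
          rw [Bool.false_or]
          cases hy : st.contains y with
          | false =>
            cases hz : (PySem.Set.add st a).contains y with
            | false => rfl
            | true =>
              exfalso
              rcases (PySem.Set.mem_add _ _ _).mp ((PySem.Set.contains_iff _ _).mp hz) with hm | hm
              · have hmm := (PySem.Set.contains_iff _ _).mpr hm
                rw [hy] at hmm
                exact Bool.false_ne_true hmm
              · exact hne hm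
          | true =>
            exact (PySem.Set.contains_iff _ _).mpr
              ((PySem.Set.mem_add _ _ _).mpr (Or.inl ((PySem.Set.contains_iff _ _).mp hy)))
        | true =>
          rw [Bool.true_or]
          exact (PySem.Set.contains_iff _ _).mpr
            ((PySem.Set.mem_add _ _ _).mpr (Or.inr (by simpa using hx)))
      have hinv' : ∀ x : String, (PySem.Set.add cache q.2).contains x
          = (d.insert q.2 q.1).contains x := by
        intro x
        rw [PySem.Dict.contains_insert, contains_add, hinv]
      obtain ⟨news, hB, hA⟩ := ih (PySem.Set.add cache q.2) (d.insert q.2 q.1)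
        (out ++ [[((PySem.List.enumerate ctx 0).foldl
              (fun (p : List String × List String) jy =>
                if jy.1 == q.1 then p
                else if (p.1.length : Int) < le then (p.1 ++ [jy.2], p.2)
                else (p.1, p.2 ++ [jy.2])) ([], [])).1, [q.2],
            ((PySem.List.enumerate ctx 0).foldl
              (fun (p : List String × List String) jy =>
                if jy.1 == q.1 then p
                else if (p.1.length : Int) < le then (p.1 ++ [jy.2], p.2)
                else (p.1, p.2 ++ [jy.2])) ([], [])).2]])
        hinv' (fun p hp => hmem p (by simp [hp]))
      refine ⟨(q.2, q.1) :: news, ?_, ?_⟩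
      · rw [List.foldl_cons, if_pos hb, hB, PySem.Dict.items_insert, hdc]
        simp
      · have hpl : ((PySem.List.enumerate ctx 0).foldl
              (fun (p : List String × List String) jy =>
                if jy.1 == q.1 then p
                else if (p.1.length : Int) < le then (p.1 ++ [jy.2], p.2)
                else (p.1, p.2 ++ [jy.2])) ([], []))
            = ((ctx.take n ++ ctx.drop (n + 1)).take le.toNat,
               (ctx.take n ++ ctx.drop (n + 1)).drop le.toNat) := by
          rw [inner_skip, hq1]
          have hfe : ((PySem.List.enumerate ctx 0).filter (fun q' => !(q'.1 == (n : Int)))).map (·.2)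
              = ctx.take n ++ ctx.drop (n + 1) := by
            have := filter_enumerate ctx 0 n hn
            simpa using this
          rw [hfe, inner_plain]
          simp
        rw [List.foldl_cons, if_neg hskip, hA, hpl, List.map_cons, hq1, entry_eq ctx le q.2 n]
        simp

-- ===== VERDICT (by name: the statement is the Claim_ definition above) =====
theorem ctx_permutations_spec : Claim_equal_ctx_permutations := by
  intro ctx ws pad_with _
  unfold Spec_ctx_permutations ctx_permutations ctx_permutations_alt
  obtain ⟨news, hB, hA⟩ := outer_lockstep ctx ws.1 pad_with (PySem.List.enumerate ctx 0)
    PySem.Set.empty PySem.Dict.empty []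
    (by intro x; simp [PySem.Set.empty, PySem.Set.contains])
    (by
      intro q hq
      rcases (PySem.List.mem_enumerate_iff _ _ _).mp hq with ⟨k, hk, rfl⟩
      exact ⟨k, hk, by simp⟩)
  simp only []
  rw [hA]
  have : (PySem.Dict.empty : PySem.Dict String Int).items = [] := rfl
  rw [hB, this]
  simp
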